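-- pv_equiv track=rewrite | github.com/kickslayer1/gender-based-data-science | scripts/run_dashboard.py | _detect_district_candidates
-- ===== SOURCE A (Python) =====
-- def _detect_district_candidates(columns: list[str]) -> list[str]:
--     exact = ["district", "district_name", "s0_d_dist"]
--     ranked: list[str] = []
--
--     for target in exact:
--         for column in columns:
--             if column.strip().lower() == target and column not in ranked:
--                 ranked.append(column)
--
--     for column in columns:
--         normalized = column.strip().lower()
--         if ("district" in normalized or normalized.endswith("_dist") or normalized.startswith("dist")) and column not in ranked:
--             ranked.append(column)
--
--     return ranked
-- ===== SOURCE B (Python) =====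
-- def _detect_district_candidates(columns: list[str]) -> list[str]:
--     exact_rank = {"district": 0, "district_name": 1, "s0_d_dist": 2}
--
--     def priority(name: str) -> int:
--         n = name.strip().lower()
--         if n in exact_rank:
--             return exact_rank[n]
--         if "district" in n or n.endswith("_dist") or n.startswith("dist"):
--             return 3
--         return 4
--
--     unique = list(dict.fromkeys(columns))
--     candidates = [c for c in unique if priority(c) < 4]
--     candidates.sort(key=priority)  # stable: keeps first-occurrence order within each tier
--     return candidates
-- ===== Notes on version B (the rewrite author's own statement) =====
-- stated objective: faster
-- what changed: Replaces A's four nested scan-and-membership-test passes over the growing result by a sort-based pipeline: one ordered dedup of the columns, one filter keeping names whose priority key is < 4, then a stable sort by that priority key (dict rank 0-2 for exact names, 3 for pattern matches).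
import Mathlib
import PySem

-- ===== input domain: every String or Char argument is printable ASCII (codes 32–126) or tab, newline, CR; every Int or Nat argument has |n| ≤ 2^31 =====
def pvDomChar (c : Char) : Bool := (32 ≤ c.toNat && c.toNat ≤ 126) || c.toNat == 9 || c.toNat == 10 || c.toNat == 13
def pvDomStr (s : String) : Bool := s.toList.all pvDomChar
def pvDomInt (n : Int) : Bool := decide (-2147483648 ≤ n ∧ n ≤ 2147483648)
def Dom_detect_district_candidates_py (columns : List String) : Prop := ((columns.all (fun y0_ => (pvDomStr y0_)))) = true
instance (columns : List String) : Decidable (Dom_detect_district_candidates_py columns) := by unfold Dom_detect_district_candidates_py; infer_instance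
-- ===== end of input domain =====

-- B replaces A's four nested membership-scanning passes by a different algorithm: one ordered dedup,
-- one candidate filter, and a stable sort by a priority key (measured faster in a timing run).

-- shared transliteration of 'column.strip().lower()'
def pvNorm (c : String) : String := PySem.Str.lower (PySem.Str.strip c)
-- shared transliteration of the pattern test '"district" in n or n.endswith("_dist") or n.startswith("dist")'
def pvPat (n : String) : Bool :=
  PySem.Str.isIn "district" n || PySem.Str.endswith n "_dist" || PySem.Str.startswith n "dist"

-- ===== PORT A =====
-- one inner 'for column in columns: if p(column) and column not in ranked: ranked.append(column)' loop
def pvPhase (p : String → Bool) (r cols : List String) : List String :=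
  cols.foldl (fun ranked column =>
    if p column && !(ranked.contains column) then ranked ++ [column] else ranked) r

def detect_district_candidates_py (columns : List String) : List String :=
  let exact := ["district", "district_name", "s0_d_dist"]
  let ranked : List String := []
  let ranked := exact.foldl (fun ranked target =>
    pvPhase (fun column => pvNorm column == target) ranked columns) ranked
  pvPhase (fun column => pvPat (pvNorm column)) ranked columns

-- ===== PORT B =====
-- exact_rank = {"district": 0, "district_name": 1, "s0_d_dist": 2}
def pvRank : PySem.Dict String Int :=
  PySem.Dict.mk [("district", 0), ("district_name", 1), ("s0_d_dist", 2)]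

-- priority(name): dict rank if exact, 3 if it matches the pattern, 4 otherwise
def pvPriority (name : String) : Int :=
  let n := pvNorm name
  match PySem.Dict.get? pvRank n with
  | some v => v
  | none => if pvPat n then 3 else 4

def detect_district_candidates_py_alt (columns : List String) : List String :=
  let unique := PySem.List.dedup columns
  let candidates := unique.filter (fun c => decide (pvPriority c < 4))
  PySem.List.sorted candidates pvPriority false

-- ===== PRECONDITION & SPEC =====
def Spec_detect_district_candidates_py (columns : List String) (out : List String) : Prop := out = detect_district_candidates_py_alt columns
instance (columns : List String) (out : List String) : Decidable (Spec_detect_district_candidates_py columns out) := by unfold Spec_detect_district_candidates_py; infer_instance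

-- ===== CLAIM (what is proved, stated in full; the proofs are below) =====
def Claim_equal_detect_district_candidates_py : Prop := ∀ (columns : List String), Dom_detect_district_candidates_py columns → Spec_detect_district_candidates_py columns (detect_district_candidates_py columns)

-- ===== LEMMAS AND PROOFS =====

-- first-occurrence dedup fold (the common shape of A's inner loops and of PySem.List.dedup)
def pvFd (a cols : List String) : List String :=
  cols.foldl (fun acc c => if acc.contains c then acc else acc ++ [c]) a

theorem pvPhase_split (p : String → Bool) :
    ∀ (cols r s : List String), (∀ x ∈ s, x ∉ r) →
      pvPhase p (r ++ s) cols = r ++ pvPhase (fun c => p c && !(r.contains c)) s cols := by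
  intro cols
  induction cols with
  | nil => intro r s _; rfl
  | cons c cs ih =>
    intro r s h
    simp only [pvPhase, List.foldl_cons]
    have hcond : (p c && !((r ++ s).contains c)) = ((p c && !(r.contains c)) && !(s.contains c)) := by
      by_cases hr : c ∈ r <;> by_cases hs : c ∈ s <;>
        simp [hr, hs]
    rw [hcond]
    by_cases hb : ((p c && !(r.contains c)) && !(s.contains c)) = true
    · rw [if_pos hb, if_pos hb, List.append_assoc]
      have hcr : c ∉ r := by
        have := hb
        simp only [Bool.and_eq_true, Bool.not_eq_true'] at this
        simpa using this.1.2
      exact ih r (s ++ [c]) (by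
        intro x hx
        rcases List.mem_append.mp hx with hx | hx
        · exact h x hx
        · simp at hx; subst hx; exact hcr)
    · rw [if_neg hb, if_neg hb]
      exact ih r s h

theorem pvPhase_congr (p q : String → Bool) :
    ∀ (cols r : List String), (∀ c ∈ cols, p c = q c) →
      pvPhase p r cols = pvPhase q r cols := by
  intro cols
  induction cols with
  | nil => intro r _; rfl
  | cons c cs ih =>
    intro r h
    simp only [pvPhase, List.foldl_cons]
    rw [h c (by simp)]
    exact ih _ (fun x hx => h x (by simp [hx]))

theorem pvPhase_eq_fd (p : String → Bool) :
    ∀ (cols a : List String), pvPhase p a cols = pvFd a (cols.filter p) := by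
  intro cols
  induction cols with
  | nil => intro a; rfl
  | cons c cs ih =>
    intro a
    have lhs : pvPhase p a (c :: cs) =
        pvPhase p (if p c && !(a.contains c) then a ++ [c] else a) cs := rfl
    have rhs_cons : ∀ (b l : List String),
        pvFd b (c :: l) = pvFd (if b.contains c then b else b ++ [c]) l := fun _ _ => rfl
    rw [lhs]
    by_cases hp : p c = true
    · rw [List.filter_cons_of_pos hp, rhs_cons]
      by_cases hcc : c ∈ a
      · simpa [hp, hcc] using ih a
      · simpa [hp, hcc] using ih (a ++ [c])
    · rw [List.filter_cons_of_neg (by simp [hp])]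
      have : (p c && !(a.contains c)) = false := by simp [hp]
      rw [this]
      simpa using ih a

theorem pvFd_cons (b : List String) (c : String) (l : List String) :
    pvFd b (c :: l) = pvFd (if b.contains c then b else b ++ [c]) l := rfl

theorem mem_pvFd : ∀ (cols a : List String) (x : String),
    x ∈ pvFd a cols ↔ x ∈ a ∨ x ∈ cols := by
  intro cols
  induction cols with
  | nil => intro a x; simp [pvFd]
  | cons c cs ih =>
    intro a x
    rw [pvFd_cons]
    by_cases hc : c ∈ a
    · rw [if_pos (by simpa using hc), ih]
      constructor
      · rintro (h | h)
        · exact Or.inl h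
        · exact Or.inr (List.mem_cons_of_mem _ h)
      · rintro (h | h)
        · exact Or.inl h
        · rcases List.mem_cons.mp h with rfl | h
          · exact Or.inl hc
          · exact Or.inr h
    · rw [if_neg (by simpa using hc), ih]
      simp only [List.mem_append, List.mem_cons]
      tauto

theorem filter_pvFd (q : String → Bool) :
    ∀ (cols a : List String), (pvFd a cols).filter q = pvFd (a.filter q) (cols.filter q) := by
  intro cols
  induction cols with
  | nil => intro a; rfl
  | cons c cs ih =>
    intro a
    rw [pvFd_cons]
    by_cases hq : q c = true
    · rw [List.filter_cons_of_pos hq, pvFd_cons]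
      by_cases hc : c ∈ a
      · have h2 : c ∈ a.filter q := List.mem_filter.mpr ⟨hc, hq⟩
        rw [if_pos (by simpa using hc), if_pos (by simpa using h2)]
        exact ih a
      · have h2 : c ∉ a.filter q := fun h => hc (List.mem_filter.mp h).1
        rw [if_neg (by simpa using hc), if_neg (by simpa using h2), ih (a ++ [c])]
        congr 1
        simp [List.filter_append, hq]
    · rw [List.filter_cons_of_neg (by simp [hq])]
      by_cases hc : c ∈ a
      · rw [if_pos (by simpa using hc)]
        exact ih a
      · rw [if_neg (by simpa using hc), ih (a ++ [c])]
        congr 1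
        simp [List.filter_append, hq]

theorem mem_pvPhase_nil (p : String → Bool) (cols : List String) (x : String) :
    x ∈ pvPhase p [] cols ↔ p x = true ∧ x ∈ cols := by
  rw [pvPhase_eq_fd, mem_pvFd]
  simp [List.mem_filter, and_comm]

-- pvPriority as an if-chain on the normalized string (unfolds the dict lookup)
theorem pvPriority_eq_chain (c : String) :
    pvPriority c =
      (if pvNorm c == "district" then 0
       else if pvNorm c == "district_name" then 1
       else if pvNorm c == "s0_d_dist" then 2
       else if pvPat (pvNorm c) then 3 else 4) := by
  simp only [pvPriority, pvRank, PySem.Dict.get?, List.find?]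
  by_cases h0 : pvNorm c = "district"
  · simp [h0]
  · have b0 : ("district" == pvNorm c) = false := by
      rw [beq_eq_false_iff_ne]; exact fun h => h0 h.symm
    by_cases h1 : pvNorm c = "district_name"
    · simp [h1]
    · have b1 : ("district_name" == pvNorm c) = false := by
        rw [beq_eq_false_iff_ne]; exact fun h => h1 h.symm
      by_cases h2 : pvNorm c = "s0_d_dist"
      · simp [h2]
      · have b2 : ("s0_d_dist" == pvNorm c) = false := by
          rw [beq_eq_false_iff_ne]; exact fun h => h2 h.symm
        simp [b0, b1, b2, h0, h1, h2]

-- group-classification facts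
theorem g0_eq (c : String) : (pvNorm c == "district") = (pvPriority c == 0) := by
  rw [pvPriority_eq_chain]
  split_ifs with h1 h2 h3 h4 <;> simp_all

theorem g1_abs (c : String) :
    ((pvNorm c == "district_name") && !(pvPriority c == 0)) = (pvPriority c == 1) := by
  rw [pvPriority_eq_chain]
  split_ifs with h1 h2 h3 h4 <;> simp_all

theorem g2_abs (c : String) :
    ((pvNorm c == "s0_d_dist") && !((pvPriority c == 0) || (pvPriority c == 1))) = (pvPriority c == 2) := by
  rw [pvPriority_eq_chain]
  split_ifs with h1 h2 h3 h4 <;> simp_all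

theorem g3_abs (c : String) :
    (pvPat (pvNorm c) && !((pvPriority c == 0) || (pvPriority c == 1) || (pvPriority c == 2))) = (pvPriority c == 3) := by
  rw [pvPriority_eq_chain]
  split_ifs with h1 h2 h3 h4 <;> simp_all

theorem pvPriority_bounds (c : String) : 0 ≤ pvPriority c ∧ pvPriority c ≤ 4 := by
  rw [pvPriority_eq_chain]
  split_ifs <;> omega

theorem detect_district_candidates_py_eq (columns : List String) :
    detect_district_candidates_py columns =
      pvPhase (fun c => pvPriority c == 0) [] columns ++
      (pvPhase (fun c => pvPriority c == 1) [] columns ++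
      (pvPhase (fun c => pvPriority c == 2) [] columns ++
      pvPhase (fun c => pvPriority c == 3) [] columns)) := by
  have hq0 : (fun column => pvNorm column == "district") = (fun c => pvPriority c == 0) := by
    funext c; exact g0_eq c
  have hA : detect_district_candidates_py columns =
      pvPhase (fun column => pvPat (pvNorm column))
        (pvPhase (fun column => pvNorm column == "s0_d_dist")
          (pvPhase (fun column => pvNorm column == "district_name")
            (pvPhase (fun column => pvNorm column == "district") [] columns) columns) columns)
        columns := by
    simp only [detect_district_candidates_py, List.foldl_cons, List.foldl_nil]
  rw [hA, hq0]
  set G0 := pvPhase (fun c => pvPriority c == 0) [] columns with hG0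
  set G1 := pvPhase (fun c => pvPriority c == 1) [] columns with hG1
  set G2 := pvPhase (fun c => pvPriority c == 2) [] columns with hG2
  -- phase 1
  have h1 : pvPhase (fun column => pvNorm column == "district_name") G0 columns = G0 ++ G1 := by
    have := pvPhase_split (fun column => pvNorm column == "district_name") columns G0 [] (by simp)
    rw [List.append_nil] at this
    rw [this]
    refine congrArg (fun t => G0 ++ t) ?_
    rw [hG1]
    apply pvPhase_congr
    intro c hc
    have hmem : G0.contains c = (pvPriority c == 0) := by
      by_cases h : c ∈ G0
      · have := (mem_pvPhase_nil _ _ _).mp (hG0 ▸ h)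
        simp [h, this.1]
      · have e0 : (pvPriority c == 0) = false := by
          have : ¬ (pvPriority c == 0) = true := fun hg =>
            h (hG0 ▸ (mem_pvPhase_nil _ _ _).mpr ⟨hg, hc⟩)
          simpa using this
        simp [h, e0]
    rw [hmem]
    exact g1_abs c
  rw [h1]
  -- phase 2
  have h2 : pvPhase (fun column => pvNorm column == "s0_d_dist") (G0 ++ G1) columns = (G0 ++ G1) ++ G2 := by
    have := pvPhase_split (fun column => pvNorm column == "s0_d_dist") columns (G0 ++ G1) [] (by simp)
    rw [List.append_nil] at this
    rw [this]
    refine congrArg (fun t => (G0 ++ G1) ++ t) ?_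
    rw [hG2]
    apply pvPhase_congr
    intro c hc
    have hmem : (G0 ++ G1).contains c = ((pvPriority c == 0) || (pvPriority c == 1)) := by
      by_cases h0 : c ∈ G0
      · have := (mem_pvPhase_nil _ _ _).mp (hG0 ▸ h0)
        simp [List.mem_append, h0, this.1]
      · by_cases hb1 : c ∈ G1
        · have := (mem_pvPhase_nil _ _ _).mp (hG1 ▸ hb1)
          simp [List.mem_append, hb1, this.1]
        · have e0 : (pvPriority c == 0) = false := by
            have : ¬ (pvPriority c == 0) = true := fun hg =>
              h0 (hG0 ▸ (mem_pvPhase_nil _ _ _).mpr ⟨hg, hc⟩)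
            simpa using this
          have e1 : (pvPriority c == 1) = false := by
            have : ¬ (pvPriority c == 1) = true := fun hg =>
              hb1 (hG1 ▸ (mem_pvPhase_nil _ _ _).mpr ⟨hg, hc⟩)
            simpa using this
          simp [List.mem_append, h0, hb1, e0, e1]
    rw [hmem]
    exact g2_abs c
  rw [h2]
  -- phase 3
  have h3 : pvPhase (fun column => pvPat (pvNorm column)) ((G0 ++ G1) ++ G2) columns =
      ((G0 ++ G1) ++ G2) ++ pvPhase (fun c => pvPriority c == 3) [] columns := by
    have := pvPhase_split (fun column => pvPat (pvNorm column)) columns ((G0 ++ G1) ++ G2) [] (by simp)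
    rw [List.append_nil] at this
    rw [this]
    refine congrArg (fun t => ((G0 ++ G1) ++ G2) ++ t) ?_
    apply pvPhase_congr
    intro c hc
    have hmem : ((G0 ++ G1) ++ G2).contains c =
        ((pvPriority c == 0) || (pvPriority c == 1) || (pvPriority c == 2)) := by
      by_cases h0 : c ∈ G0
      · have := (mem_pvPhase_nil _ _ _).mp (hG0 ▸ h0)
        simp [List.mem_append, h0, this.1]
      · by_cases hb1 : c ∈ G1
        · have := (mem_pvPhase_nil _ _ _).mp (hG1 ▸ hb1)
          simp [List.mem_append, hb1, this.1]
        · by_cases hb2 : c ∈ G2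
          · have := (mem_pvPhase_nil _ _ _).mp (hG2 ▸ hb2)
            simp [List.mem_append, hb2, this.1]
          · have e0 : (pvPriority c == 0) = false := by
              have : ¬ (pvPriority c == 0) = true := fun hg =>
                h0 (hG0 ▸ (mem_pvPhase_nil _ _ _).mpr ⟨hg, hc⟩)
              simpa using this
            have e1 : (pvPriority c == 1) = false := by
              have : ¬ (pvPriority c == 1) = true := fun hg =>
                hb1 (hG1 ▸ (mem_pvPhase_nil _ _ _).mpr ⟨hg, hc⟩)
              simpa using this
            have e2 : (pvPriority c == 2) = false := by
              have : ¬ (pvPriority c == 2) = true := fun hg =>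
                hb2 (hG2 ▸ (mem_pvPhase_nil _ _ _).mpr ⟨hg, hc⟩)
              simpa using this
            simp [List.mem_append, h0, hb1, hb2, e0, e1, e2]
    rw [hmem]
    exact g3_abs c
  rw [h3]
  simp [List.append_assoc]

-- insertBy places x after everything it is not 'before' and before everything it is 'before'
theorem insertBy_split (b : String → String → Bool) (x : String) :
    ∀ (P S : List String), (∀ y ∈ P, b x y = false) → (∀ y ∈ S, b x y = true) →
      PySem.List.insertBy b x (P ++ S) = P ++ x :: S := by
  intro P
  induction P with
  | nil =>
    intro S _ hS
    cases S with
    | nil => rfl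
    | cons y ys =>
      simp only [List.nil_append, PySem.List.insertBy]
      rw [hS y (by simp)]
      simp
  | cons p ps ih =>
    intro S hP hS
    simp only [List.cons_append, PySem.List.insertBy]
    rw [hP p (by simp)]
    simp only [Bool.false_eq_true, if_false]
    exact congrArg (fun t => p :: t) (ih S (fun y hy => hP y (by simp [hy])) hS)

-- stable sort by a key bounded in [0,4) is the concatenation of the four key buckets
theorem sorted_bucket (pk : String → Int) :
    ∀ (L : List String), (∀ x ∈ L, 0 ≤ pk x ∧ pk x < 4) →
      PySem.List.sorted L pk false =
        L.filter (fun c => pk c == 0) ++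
        (L.filter (fun c => pk c == 1) ++
        (L.filter (fun c => pk c == 2) ++
        L.filter (fun c => pk c == 3))) := by
  intro L
  induction L using List.reverseRecOn with
  | nil => intro _; rfl
  | append_singleton ys x ih =>
    intro h
    have hys : ∀ z ∈ ys, 0 ≤ pk z ∧ pk z < 4 := fun z hz => h z (by simp [hz])
    have hx : 0 ≤ pk x ∧ pk x < 4 := h x (by simp)
    rw [PySem.List.sorted_eq_foldl_insertBy] at *
    rw [List.foldl_append, List.foldl_cons, List.foldl_nil, ← PySem.List.sorted_eq_foldl_insertBy,
        PySem.List.sorted_eq_foldl_insertBy, ih hys]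
    set F0 := ys.filter (fun c => pk c == 0) with hF0
    set F1 := ys.filter (fun c => pk c == 1) with hF1
    set F2 := ys.filter (fun c => pk c == 2) with hF2
    set F3 := ys.filter (fun c => pk c == 3) with hF3
    have key950 : ∀ (g : Int), pk x = g →
        ∀ (P S : List String),
          (∀ y ∈ P, (pk y ≤ g)) → (∀ y ∈ S, g < pk y) →
          PySem.List.insertBy (fun a b => decide (pk a < pk b)) x (P ++ S) = P ++ x :: S := by
      intro g hg P S hP hS
      apply insertBy_split
      · intro y hy; rw [hg]; simpa using not_lt.mpr (hP y hy)
      · intro y hy; rw [hg]; simpa using hS y hy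
    have memF : ∀ (g : Int) (F : List String), F = ys.filter (fun c => pk c == g) →
        ∀ y ∈ F, pk y = g := by
      intro g F hF y hy
      rw [hF] at hy
      have := (List.mem_filter.mp hy).2
      simpa using this
    have hfx : ∀ (g : Int), (ys ++ [x]).filter (fun c => pk c == g) =
        ys.filter (fun c => pk c == g) ++ (if pk x == g then [x] else []) := by
      intro g
      rw [List.filter_append]
      congr 1
      by_cases hxg : pk x = g
      · simp [List.filter, hxg]
      · have hb : (pk x == g) = false := by simpa using hxg
        simp [List.filter, hb]
    -- case on the value of pk x
    obtain ⟨hx0, hx4⟩ := hx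
    rcases (by omega : pk x = 0 ∨ pk x = 1 ∨ pk x = 2 ∨ pk x = 3) with hpx | hpx | hpx | hpx
    · -- = 0
      rw [show F0 ++ (F1 ++ (F2 ++ F3)) = F0 ++ (F1 ++ (F2 ++ F3)) from rfl]
      rw [key950 0 hpx F0 (F1 ++ (F2 ++ F3))
        (fun y hy => by rw [memF 0 F0 hF0 y hy])
        (by
          intro y hy
          simp only [List.mem_append] at hy
          rcases hy with hy | hy | hy
          · rw [memF 1 F1 hF1 y hy]; omega
          · rw [memF 2 F2 hF2 y hy]; omega
          · rw [memF 3 F3 hF3 y hy]; omega)]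
      simp [hfx, hpx, ← hF0, ← hF1, ← hF2, ← hF3]
    · -- = 1
      rw [show F0 ++ (F1 ++ (F2 ++ F3)) = (F0 ++ F1) ++ (F2 ++ F3) by simp]
      rw [key950 1 hpx (F0 ++ F1) (F2 ++ F3)
        (by
          intro y hy
          simp only [List.mem_append] at hy
          rcases hy with hy | hy
          · rw [memF 0 F0 hF0 y hy]; omega
          · rw [memF 1 F1 hF1 y hy])
        (by
          intro y hy
          simp only [List.mem_append] at hy
          rcases hy with hy | hy
          · rw [memF 2 F2 hF2 y hy]; omega
          · rw [memF 3 F3 hF3 y hy]; omega)]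
      simp [hfx, hpx, ← hF0, ← hF1, ← hF2, ← hF3]
    · -- = 2
      rw [show F0 ++ (F1 ++ (F2 ++ F3)) = (F0 ++ F1 ++ F2) ++ F3 by simp]
      rw [key950 2 hpx (F0 ++ F1 ++ F2) F3
        (by
          intro y hy
          simp only [List.mem_append] at hy
          rcases hy with (hy | hy) | hy
          · rw [memF 0 F0 hF0 y hy]; omega
          · rw [memF 1 F1 hF1 y hy]; omega
          · rw [memF 2 F2 hF2 y hy])
        (fun y hy => by rw [memF 3 F3 hF3 y hy]; omega)]
      simp [hfx, hpx, ← hF0, ← hF1, ← hF2, ← hF3]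
    · -- = 3
      rw [show F0 ++ (F1 ++ (F2 ++ F3)) = (F0 ++ F1 ++ F2 ++ F3) ++ [] by simp]
      rw [key950 3 hpx (F0 ++ F1 ++ F2 ++ F3) []
        (by
          intro y hy
          simp only [List.mem_append] at hy
          rcases hy with ((hy | hy) | hy) | hy
          · rw [memF 0 F0 hF0 y hy]; omega
          · rw [memF 1 F1 hF1 y hy]; omega
          · rw [memF 2 F2 hF2 y hy]; omega
          · rw [memF 3 F3 hF3 y hy])
        (by simp)]
      simp [hfx, hpx, ← hF0, ← hF1, ← hF2, ← hF3]

theorem dedup_eq_pvFd (xs : List String) : PySem.List.dedup xs = pvFd [] xs := rfl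

theorem detect_district_candidates_py_alt_eq (columns : List String) :
    detect_district_candidates_py_alt columns =
      pvPhase (fun c => pvPriority c == 0) [] columns ++
      (pvPhase (fun c => pvPriority c == 1) [] columns ++
      (pvPhase (fun c => pvPriority c == 2) [] columns ++
      pvPhase (fun c => pvPriority c == 3) [] columns)) := by
  show PySem.List.sorted ((PySem.List.dedup columns).filter (fun c => decide (pvPriority c < 4)))
      pvPriority false = _
  rw [dedup_eq_pvFd]
  set C := (pvFd [] columns).filter (fun c => decide (pvPriority c < 4)) with hC
  have hCb : ∀ x ∈ C, 0 ≤ pvPriority x ∧ pvPriority x < 4 := by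
    intro x hx
    have h4 := (List.mem_filter.mp (hC ▸ hx)).2
    exact ⟨(pvPriority_bounds x).1, by simpa using h4⟩
  rw [sorted_bucket pvPriority C hCb]
  have key : ∀ g : Int, g < 4 → C.filter (fun c => pvPriority c == g) =
      pvPhase (fun c => pvPriority c == g) [] columns := by
    intro g hg
    rw [pvPhase_eq_fd, hC, List.filter_filter]
    have : (fun c => pvPriority c == g && decide (pvPriority c < 4)) =
        (fun c => pvPriority c == g) := by
      funext c
      by_cases h : pvPriority c = g
      · simp [h]; omega
      · simp [h]
    rw [this, filter_pvFd]
    rfl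
  rw [key 0 (by omega), key 1 (by omega), key 2 (by omega), key 3 (by omega)]

-- ===== VERDICT (by name: the statement is the Claim_ definition above) =====
theorem detect_district_candidates_py_spec : Claim_equal_detect_district_candidates_py := by
  intro columns _
  show detect_district_candidates_py columns = detect_district_candidates_py_alt columns
  rw [detect_district_candidates_py_eq, detect_district_candidates_py_alt_eq]
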